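-- pv_equiv track=rewrite | github.com/qiguanjie/private_aligner_test | timestamp/utils/metric.py | boundaries_to_intervals
-- ===== SOURCE A (Python) =====
-- def boundaries_to_intervals(boundaries):
--     """
--     Convert a list of boundaries to a list of intervals.
--     Args:
--         boundaries (list): A list of boundaries, where 1 indicates a boundary. The boundary mast start with 0 and end with 1.
--     return:
--         intervals (list): A list of intervals, where each interval is a tuple of (start, end).
--     """
--     assert boundaries[-1] == 1
--     n = len(boundaries)
--     intervals = []
--     start = end = 0
--     while end < n:
--         if boundaries[end] != 0:
--             intervals.append((start, end))
--             start = end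
--         end += 1
--     return intervals
-- ===== SOURCE B (Python) =====
-- def boundaries_to_intervals(boundaries):
--     assert boundaries[-1] == 1
--     intervals = []
--     end = None
--     for i in range(len(boundaries) - 1, -1, -1):
--         if boundaries[i] != 0:
--             if end is not None:
--                 intervals.append((i, end))
--             end = i
--     intervals.append((0, end))
--     intervals.reverse()
--     return intervals
-- ===== Notes on version B (the rewrite author's own statement) =====
-- stated objective: alternative
-- what changed: Replaces A's forward while-loop carrying the start of the open interval with a right-to-left scan that remembers the end of the pending interval, builds the interval list back-to-front and reverses it once at the end.
import Mathlib
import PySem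

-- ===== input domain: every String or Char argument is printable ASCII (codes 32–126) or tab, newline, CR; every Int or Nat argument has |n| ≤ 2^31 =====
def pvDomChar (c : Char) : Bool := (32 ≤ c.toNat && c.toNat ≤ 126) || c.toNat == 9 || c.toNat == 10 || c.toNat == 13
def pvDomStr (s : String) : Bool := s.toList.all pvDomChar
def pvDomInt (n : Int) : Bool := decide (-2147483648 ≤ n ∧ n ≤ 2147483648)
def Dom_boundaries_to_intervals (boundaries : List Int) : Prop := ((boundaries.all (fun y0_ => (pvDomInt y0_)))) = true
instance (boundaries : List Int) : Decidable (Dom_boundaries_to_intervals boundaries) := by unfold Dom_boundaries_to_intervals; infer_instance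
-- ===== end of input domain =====

-- B replaces A's forward while-loop (state: start of the open interval) with a RIGHT-TO-LEFT
-- scan that remembers the end of the pending interval, builds the result back-to-front and
-- reverses it once at the close (alternative decomposition, same cost).

-- ===== PORT A =====
-- the while loop: `end` walks the list, state is (intervals accumulator, start)
def btiLoopA (bs : List Int) (e : Int) (start : Int) (acc : List (Int × Int)) : List (Int × Int) :=
  match bs with
  | [] => acc
  | v :: rest =>
      if v ≠ 0 then btiLoopA rest (e + 1) e (acc ++ [(start, e)])
      else btiLoopA rest (e + 1) start acc

def boundaries_to_intervals (boundaries : List Int) : List (Int × Int) :=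
  -- the `assert boundaries[-1] == 1` raises outside Pre_; inside Pre_ it passes
  btiLoopA boundaries 0 0 []

-- ===== PORT B =====
-- `for i in range(n-1, -1, -1)` with `boundaries[i]` = a left fold over the reversed
-- enumerated list (indices descending, value = boundaries[i]); state is (intervals, end)
def btiLoopB (ps : List (Int × Int)) (acc : List (Int × Int)) (endOpt : Option Int) :
    List (Int × Int) × Option Int :=
  ps.foldl (fun (s : List (Int × Int) × Option Int) (p : Int × Int) =>
    if p.2 ≠ 0 then
      ((match s.2 with | some e => s.1 ++ [(p.1, e)] | none => s.1), some p.1)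
    else s) (acc, endOpt)

def boundaries_to_intervals_alt (boundaries : List Int) : List (Int × Int) :=
  let st := btiLoopB ((PySem.List.enumerate boundaries).reverse) [] none
  match st.2 with
  | some e => (st.1 ++ [(0, e)]).reverse   -- intervals.append((0, end)); intervals.reverse()
  | none => st.1.reverse                   -- unreachable under Pre_ (Python's (0, None) tuple has no Int pair)

-- ===== PRECONDITION & SPEC =====
-- Pre_ excludes exactly the inputs where A raises: the empty list (IndexError) and a last element other than 1 (AssertionError)
def Pre_boundaries_to_intervals (boundaries : List Int) : Prop := boundaries.getLast? = some 1
instance (boundaries : List Int) : Decidable (Pre_boundaries_to_intervals boundaries) := by unfold Pre_boundaries_to_intervals; infer_instance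
def pvWitness_boundaries_to_intervals : List Int := [0, 1, 0, 1]

def Spec_boundaries_to_intervals (boundaries : List Int) (out : List (Int × Int)) : Prop := out = boundaries_to_intervals_alt boundaries
instance (boundaries : List Int) (out : List (Int × Int)) : Decidable (Spec_boundaries_to_intervals boundaries out) := by unfold Spec_boundaries_to_intervals; infer_instance

-- ===== CLAIM (what is proved, stated in full; the proofs are below) =====
def Claim_equal_boundaries_to_intervals : Prop := ∀ (boundaries : List Int), Dom_boundaries_to_intervals boundaries → Pre_boundaries_to_intervals boundaries → Spec_boundaries_to_intervals boundaries (boundaries_to_intervals boundaries)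

-- ===== LEMMAS AND PROOFS =====

-- marker indices of bs when the first element has index e
def btiMarks (bs : List Int) (e : Int) : List Int :=
  match bs with
  | [] => []
  | v :: rest => if v ≠ 0 then e :: btiMarks rest (e + 1) else btiMarks rest (e + 1)

theorem dropLast_cons_zip (m : Int) (rest : List Int) :
    (m :: rest).dropLast.zip rest = (m :: rest.dropLast).zip rest := by
  cases rest <;> simp [List.dropLast]

theorem zip_shift_cons (start m : Int) (rest : List Int) :
    ((start :: (m :: rest).dropLast).zip (m :: rest))
      = (start, m) :: ((m :: rest.dropLast).zip rest) := by
  cases rest with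
  | nil => simp
  | cons r rs => simp [List.dropLast]

-- A's loop produces the shift-and-zip of the marker indices
theorem btiLoopA_eq (bs : List Int) (e start : Int) (acc : List (Int × Int)) :
    btiLoopA bs e start acc
      = acc ++ ((start :: (btiMarks bs e).dropLast).zip (btiMarks bs e)) := by
  induction bs generalizing e start acc with
  | nil => simp [btiLoopA, btiMarks]
  | cons v rest ih =>
      by_cases hv : v = 0
      · simp [btiLoopA, btiMarks, hv, ih]
      · simp only [btiLoopA, btiMarks, ne_eq, hv, not_false_eq_true, if_pos]
        rw [ih, zip_shift_cons]
        simp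

-- B's fold skips zero entries: it equals the same fold over the marker indices only
def btiRev (ms : List Int) (s : List (Int × Int) × Option Int) : List (Int × Int) × Option Int :=
  ms.foldl (fun s m =>
    ((match s.2 with | some e => s.1 ++ [(m, e)] | none => s.1), some m)) s

theorem btiLoopB_eq_btiRev (ps : List (Int × Int)) (acc : List (Int × Int)) (eo : Option Int) :
    btiLoopB ps acc eo
      = btiRev (ps.filterMap (fun p => if p.2 ≠ 0 then some p.1 else none)) (acc, eo) := by
  induction ps generalizing acc eo with
  | nil => simp [btiLoopB, btiRev]
  | cons p rest ih =>
      by_cases hv : p.2 = 0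
      · simp [btiLoopB, btiRev, hv] at ih ⊢; exact ih acc eo
      · cases eo <;>
          simp [btiLoopB, btiRev, hv] at ih ⊢ <;> exact ih _ _

-- state of B's fold after consuming the reversed marker list
theorem btiRev_reverse (ms : List Int) :
    btiRev ms.reverse ([], none)
      = match ms with
        | [] => ([], none)
        | m :: rest => ((((m :: rest.dropLast).zip rest)).reverse, some m) := by
  induction ms with
  | nil => simp [btiRev]
  | cons m rest ih =>
      have hstep : btiRev (rest.reverse ++ [m]) ([], none)
          = btiRev [m] (btiRev rest.reverse ([], none)) := by
        simp [btiRev, List.foldl_append]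
      cases rest with
      | nil => simp [btiRev]
      | cons r rs =>
          simp only [List.reverse_cons] at *
          rw [hstep, ih]
          simp [btiRev, dropLast_cons_zip]

theorem btiMarks_eq_filterMap (bs : List Int) (k : Int) :
    btiMarks bs k
      = ((PySem.List.enumerate bs k).filterMap (fun p => if p.2 ≠ 0 then some p.1 else none)) := by
  induction bs generalizing k with
  | nil => simp [btiMarks]
  | cons v rest ih =>
      by_cases hv : v = 0 <;>
        simp [btiMarks, PySem.List.enumerate_cons, hv, ih (k + 1)]

-- ===== VERDICT (by name: the statement is the Claim_ definition above) =====
theorem boundaries_to_intervals_spec : Claim_equal_boundaries_to_intervals := by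
  intro boundaries _ _
  show boundaries_to_intervals boundaries = boundaries_to_intervals_alt boundaries
  unfold boundaries_to_intervals boundaries_to_intervals_alt
  rw [btiLoopA_eq, btiLoopB_eq_btiRev]
  rw [List.filterMap_reverse, ← btiMarks_eq_filterMap boundaries 0, btiRev_reverse]
  cases h : btiMarks boundaries 0 with
  | nil => simp
  | cons m rest => simp [dropLast_cons_zip]
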